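-- pv_equiv track=rewrite | github.com/CodeMusic/RoverSeerApi | api_silicon_server/workflows/tools/sections.py | _improve_document_structure
-- ===== SOURCE A (Python) =====
-- from typing import Any, Dict, List
--
-- def _improve_document_structure(document: str, context: Dict) -> str:
--     """Improve document structure by reorganizing and enhancing sections"""
--
--     # Ensure proper hierarchical structure
--     lines = document.split('\n')
--     improved_lines = []
--
--     for line in lines:
--         # Ensure proper section hierarchy
--         if line.startswith('## ') and not any(prev_line.startswith('# ') for prev_line in improved_lines):
--             # Add main title if missing
--             improved_lines.insert(0, f"# {context.get('original_request', 'Research Analysis')}")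
--             improved_lines.insert(1, "")
--
--         improved_lines.append(line)
--
--     return '\n'.join(improved_lines)
-- ===== SOURCE B (Python) =====
-- def _needs_title(lines):
--     """True iff an H2 heading appears before any H1 heading."""
--     for line in lines:
--         if line.startswith('# '):
--             return False
--         if line.startswith('## '):
--             return True
--     return False
--
--
-- def _improve_document_structure(document: str, context) -> str:
--     lines = document.split('\n')
--     if _needs_title(lines):
--         lines = [f"# {context.get('original_request', 'Research Analysis')}", ""] + lines
--     return '\n'.join(lines)
-- ===== Notes on version B (the rewrite author's own statement) =====
-- stated objective: simpler
-- what changed: Replaces the per-line accumulator with insert-at-front and a repeated any() scan over the lines built so far by a single decide-then-concatenate pass: one scan decides whether an H2 precedes any H1, and the title pair is prepended once.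
import Mathlib
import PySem

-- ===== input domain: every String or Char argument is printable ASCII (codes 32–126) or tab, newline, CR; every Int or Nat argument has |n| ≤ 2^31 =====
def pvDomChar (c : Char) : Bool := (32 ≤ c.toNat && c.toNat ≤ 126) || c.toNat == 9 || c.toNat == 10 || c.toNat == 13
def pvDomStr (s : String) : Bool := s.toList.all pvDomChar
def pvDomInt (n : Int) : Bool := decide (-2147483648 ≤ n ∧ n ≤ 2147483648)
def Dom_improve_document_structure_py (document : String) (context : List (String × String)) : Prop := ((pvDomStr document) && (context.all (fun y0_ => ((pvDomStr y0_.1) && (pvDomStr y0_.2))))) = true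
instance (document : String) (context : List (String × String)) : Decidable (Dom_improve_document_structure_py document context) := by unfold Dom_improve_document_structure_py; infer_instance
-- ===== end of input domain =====

-- ===== PORT A =====
-- B replaces A's accumulator-with-insert loop (with its repeated any() scan) by one
-- decide-then-concatenate scan; simpler, same return value on every input.

-- ===== PORT A continued =====
def pvLoopA (title : String) : List String → List String → List String
  | acc, [] => acc
  | acc, line :: rest =>
      let acc' := if PySem.Str.startswith line "## " && !(acc.any (fun p => PySem.Str.startswith p "# "))
                  then title :: "" :: acc else acc
      pvLoopA title (acc' ++ [line]) rest

-- document.split('\n'): split? is some, since the separator is nonempty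
def improve_document_structure_py (document : String) (context : List (String × String)) : String :=
  let lines := (PySem.Str.split? document "\n").getD []
  PySem.Str.join "\n"
    (pvLoopA ("# " ++ PySem.Dict.getD ⟨context⟩ "original_request" "Research Analysis") [] lines)

-- ===== PORT B =====
def pvNeedsTitle : List String → Bool
  | [] => false
  | l :: rest =>
      if PySem.Str.startswith l "# " then false
      else if PySem.Str.startswith l "## " then true
      else pvNeedsTitle rest

def improve_document_structure_py_alt (document : String) (context : List (String × String)) : String :=
  let lines := (PySem.Str.split? document "\n").getD []
  let lines2 := if pvNeedsTitle lines then
      ("# " ++ PySem.Dict.getD ⟨context⟩ "original_request" "Research Analysis") :: "" :: lines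
    else lines
  PySem.Str.join "\n" lines2

-- ===== PRECONDITION & SPEC =====
def Spec_improve_document_structure_py (document : String) (context : List (String × String)) (out : String) : Prop := out = improve_document_structure_py_alt document context
instance (document : String) (context : List (String × String)) (out : String) : Decidable (Spec_improve_document_structure_py document context out) := by unfold Spec_improve_document_structure_py; infer_instance

-- ===== CLAIM (what is proved, stated in full; the proofs are below) =====
def Claim_equal_improve_document_structure_py : Prop := ∀ (document : String) (context : List (String × String)), Dom_improve_document_structure_py document context → Spec_improve_document_structure_py document context (improve_document_structure_py document context)

-- ===== LEMMAS AND PROOFS =====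

theorem pvStarts_title (g : String) : PySem.Str.startswith ("# " ++ g) "# " = true := by
  simp [PySem.Str.startswith, PySem.Chars.startswith, List.isPrefixOf]

theorem pvStarts_h1_not_h2 (s : String) (h : PySem.Str.startswith s "# " = true) :
    PySem.Str.startswith s "## " = false := by
  simp [PySem.Str.startswith, PySem.Chars.startswith] at *
  cases hs : s.toList with
  | nil => simp [hs] at h
  | cons a t => cases t with
    | nil => simp [hs] at h
    | cons b u =>
      rw [hs] at h
      simp [List.isPrefixOf] at h
      obtain ⟨h1, h2⟩ := h
      subst h1; subst h2
      simp [hs, List.isPrefixOf]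

theorem pvLoopA_done (title : String) (acc rest : List String)
    (h : acc.any (fun p => PySem.Str.startswith p "# ") = true) :
    pvLoopA title acc rest = acc ++ rest := by
  induction rest generalizing acc with
  | nil => simp [pvLoopA]
  | cons line rest ih =>
    have hany : (acc ++ [line]).any (fun p => PySem.Str.startswith p "# ") = true := by
      rw [List.any_append, h]; rfl
    rw [pvLoopA]
    rw [show (if PySem.Str.startswith line "## " && !(acc.any (fun p => PySem.Str.startswith p "# "))
          then title :: "" :: acc else acc) = acc by rw [h]; simp]
    rw [ih _ hany]
    simp

theorem pvLoopA_scan (title : String) (acc rest : List String)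
    (ht : PySem.Str.startswith title "# " = true)
    (h : acc.any (fun p => PySem.Str.startswith p "# ") = false) :
    pvLoopA title acc rest =
      if pvNeedsTitle rest then title :: "" :: (acc ++ rest) else acc ++ rest := by
  induction rest generalizing acc with
  | nil => simp [pvLoopA, pvNeedsTitle]
  | cons line rest ih =>
    rw [pvLoopA]
    by_cases h1 : PySem.Str.startswith line "# " = true
    · have h2 := pvStarts_h1_not_h2 line h1
      have hany : (acc ++ [line]).any (fun p => PySem.Str.startswith p "# ") = true := by
        simp only [List.any_append, List.any_cons, List.any_nil, h, h1]
        rfl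
      have hn : pvNeedsTitle (line :: rest) = false := by
        rw [pvNeedsTitle, if_pos h1]
      rw [show (if PySem.Str.startswith line "## " && !(acc.any (fun p => PySem.Str.startswith p "# "))
            then title :: "" :: acc else acc) = acc by rw [h2]; simp]
      rw [pvLoopA_done title _ rest hany, hn]
      simp
    · replace h1 : PySem.Str.startswith line "# " = false := by
        cases hb : PySem.Str.startswith line "# " <;> simp_all
      have h1c : PySem.Chars.startswith line.toList ['#', ' '] = false := by simpa using h1
      by_cases h2 : PySem.Str.startswith line "## " = true
      · have hany : ((title :: "" :: acc) ++ [line]).any (fun p => PySem.Str.startswith p "# ") = true := by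
          simp only [List.any_cons, List.any_append, List.any_nil, ht, Bool.true_or]
        have hn : pvNeedsTitle (line :: rest) = true := by
          rw [pvNeedsTitle, if_neg (by simp [h1c]), if_pos h2]
        rw [show (if PySem.Str.startswith line "## " && !(acc.any (fun p => PySem.Str.startswith p "# "))
              then title :: "" :: acc else acc) = title :: "" :: acc by rw [h2, h]; simp]
        rw [pvLoopA_done title _ rest hany, hn]
        simp
      · replace h2 : PySem.Str.startswith line "## " = false := by
          cases hb : PySem.Str.startswith line "## " <;> simp_all
        have h2c : PySem.Chars.startswith line.toList ['#', '#', ' '] = false := by simpa using h2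
        have hany : (acc ++ [line]).any (fun p => PySem.Str.startswith p "# ") = false := by
          simp only [List.any_append, List.any_cons, List.any_nil, h, h1]
          rfl
        have hn : pvNeedsTitle (line :: rest) = pvNeedsTitle rest := by
          rw [pvNeedsTitle, if_neg (by simp [h1c]), if_neg (by simp [h2c])]
        rw [show (if PySem.Str.startswith line "## " && !(acc.any (fun p => PySem.Str.startswith p "# "))
              then title :: "" :: acc else acc) = acc by rw [h2]; simp]
        rw [ih _ hany, hn]
        by_cases hn2 : pvNeedsTitle rest = true <;> simp [hn2]

-- ===== VERDICT (by name: the statement is the Claim_ definition above) =====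
theorem improve_document_structure_py_spec : Claim_equal_improve_document_structure_py := by
  intro document context _
  unfold Spec_improve_document_structure_py improve_document_structure_py improve_document_structure_py_alt
  dsimp only
  rw [pvLoopA_scan _ [] _ (pvStarts_title _) (by simp)]
  split <;> simp
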